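-- pv_equiv track=rewrite | github.com/brosenzweig27/eyeball | functions/classifierskxk.py | activations_to_binary
-- ===== SOURCE A (Python) =====
-- def activations_to_binary(activations:list):
--     # Define the possible strings (c0 to c13)
--     categories = [f'c{i}' for i in range(14)]
--
--     # Map each category to its index
--     category_to_index = {category: index for index, category in enumerate(categories)}
--
--     # Convert each sublist into a binary vector
--     binary_vectors = []
--     for sublist in activations:
--         # Create a binary vector initialized with 0s
--         binary_vector = [0] * len(categories)
--         # Set positions corresponding to the strings in the sublist to 1
--         for string in sublist:
--             if string in category_to_index:
--                 binary_vector[category_to_index[string]] = 1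
--         binary_vectors.append(binary_vector)
--
--     return binary_vectors
-- ===== SOURCE B (Python) =====
-- def activations_to_binary(activations: list):
--     categories = [f'c{i}' for i in range(14)]
--     binary_vectors = []
--     for sublist in activations:
--         present = set(sublist)
--         binary_vectors.append([1 if c in present else 0 for c in categories])
--     return binary_vectors
-- ===== Notes on version B (the rewrite author's own statement) =====
-- stated objective: idiomatic
-- what changed: B drives the loop over the fixed 14-category list, testing membership in a set built from the sublist, instead of iterating over the sublist and writing 1s into indexed positions of a zero vector via a category-to-index dict.
import Mathlib
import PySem

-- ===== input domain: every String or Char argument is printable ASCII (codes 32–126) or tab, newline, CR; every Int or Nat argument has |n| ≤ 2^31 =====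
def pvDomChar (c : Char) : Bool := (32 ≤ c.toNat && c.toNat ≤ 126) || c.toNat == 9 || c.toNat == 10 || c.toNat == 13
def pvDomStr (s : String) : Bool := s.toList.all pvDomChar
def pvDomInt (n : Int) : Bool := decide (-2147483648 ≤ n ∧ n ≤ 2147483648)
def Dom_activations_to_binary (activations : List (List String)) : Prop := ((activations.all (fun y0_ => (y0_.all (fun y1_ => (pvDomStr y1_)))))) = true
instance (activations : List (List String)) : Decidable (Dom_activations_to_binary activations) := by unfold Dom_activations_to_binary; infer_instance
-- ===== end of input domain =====

-- B iterates over the fixed 14-category list testing membership in a set of the sublist, instead of A's writes into indexed positions of a zero vector via a category→index dict; objective: idiomatic.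

-- ===== PORT A =====
-- categories = [f'c{i}' for i in range(14)]
def pvCats : List String := (PySem.List.pyRange 0 14 1).map (fun i => "c" ++ PySem.Int.toStr i)
-- category_to_index = {category: index for index, category in enumerate(categories)}
def pvCatIdx : PySem.Dict String Int :=
  (PySem.List.enumerate pvCats).foldl (fun d p => d.insert p.2 p.1) PySem.Dict.empty
-- inner loop body: if string in category_to_index: binary_vector[category_to_index[string]] = 1
-- (pySetD is exact here: every stored index is 0..13, in range of the 14-long vector, so Python never raises)
def pvStepA (bv : List Int) (s : String) : List Int :=
  match pvCatIdx.get? s with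
  | some idx => PySem.List.pySetD bv idx 1
  | none => bv

def activations_to_binary (activations : List (List String)) : List (List Int) :=
  activations.foldl
    (fun binary_vectors sublist =>
      binary_vectors ++ [sublist.foldl pvStepA (List.replicate pvCats.length (0 : Int))])
    []

-- ===== PORT B =====
-- Source B's categories is the same comprehension; pvCats (above) serves as its transliteration too

def activations_to_binary_alt (activations : List (List String)) : List (List Int) :=
  activations.foldl
    (fun binary_vectors sublist =>
      let present : PySem.Set String := PySem.Set.ofList sublist
      binary_vectors ++ [pvCats.map (fun c => if present.contains c then (1 : Int) else 0)])
    []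

-- ===== PRECONDITION & SPEC =====
def Spec_activations_to_binary (activations : List (List String)) (out : List (List Int)) : Prop := out = activations_to_binary_alt activations
instance (activations : List (List String)) (out : List (List Int)) : Decidable (Spec_activations_to_binary activations out) := by unfold Spec_activations_to_binary; infer_instance

-- ===== CLAIM (what is proved, stated in full; the proofs are below) =====
def Claim_equal_activations_to_binary : Prop := ∀ (activations : List (List String)), Dom_activations_to_binary activations → Spec_activations_to_binary activations (activations_to_binary activations)

-- ===== LEMMAS AND PROOFS =====

lemma pvCats_lit : pvCats = ["c0","c1","c2","c3","c4","c5","c6","c7","c8","c9","c10","c11","c12","c13"] := rfl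
lemma pvCatIdx_lit : pvCatIdx = PySem.Dict.mk [("c0",0),("c1",1),("c2",2),("c3",3),("c4",4),("c5",5),("c6",6),("c7",7),("c8",8),("c9",9),("c10",10),("c11",11),("c12",12),("c13",13)] := rfl

-- one step of A's inner loop on a vector in "indicator of seen" form flips exactly the entry of s (if s is a category)
lemma pvStepA_map (seen : String → Bool) (s : String) :
    pvStepA (pvCats.map fun c => if seen c then (1:Int) else 0) s
      = pvCats.map fun c => if (seen c || (c == s)) then (1:Int) else 0 := by
  rw [pvCats_lit]
  unfold pvStepA
  rw [pvCatIdx_lit]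
  simp only [PySem.Dict.get?_mk_cons, List.map]
  by_cases h0 : s = "c0"
  · subst h0; simp [PySem.List.pySetD, PySem.List.pySet?, PySem.List.pyIdx?, List.set]
  by_cases h1 : s = "c1"
  · subst h1; simp [PySem.List.pySetD, PySem.List.pySet?, PySem.List.pyIdx?, List.set]
  by_cases h2 : s = "c2"
  · subst h2; simp [PySem.List.pySetD, PySem.List.pySet?, PySem.List.pyIdx?, List.set]
  by_cases h3 : s = "c3"
  · subst h3; simp [PySem.List.pySetD, PySem.List.pySet?, PySem.List.pyIdx?, List.set]
  by_cases h4 : s = "c4"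
  · subst h4; simp [PySem.List.pySetD, PySem.List.pySet?, PySem.List.pyIdx?, List.set]
  by_cases h5 : s = "c5"
  · subst h5; simp [PySem.List.pySetD, PySem.List.pySet?, PySem.List.pyIdx?, List.set]
  by_cases h6 : s = "c6"
  · subst h6; simp [PySem.List.pySetD, PySem.List.pySet?, PySem.List.pyIdx?, List.set]
  by_cases h7 : s = "c7"
  · subst h7; simp [PySem.List.pySetD, PySem.List.pySet?, PySem.List.pyIdx?, List.set]
  by_cases h8 : s = "c8"
  · subst h8; simp [PySem.List.pySetD, PySem.List.pySet?, PySem.List.pyIdx?, List.set]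
  by_cases h9 : s = "c9"
  · subst h9; simp [PySem.List.pySetD, PySem.List.pySet?, PySem.List.pyIdx?, List.set]
  by_cases h10 : s = "c10"
  · subst h10; simp [PySem.List.pySetD, PySem.List.pySet?, PySem.List.pyIdx?, List.set]
  by_cases h11 : s = "c11"
  · subst h11; simp [PySem.List.pySetD, PySem.List.pySet?, PySem.List.pyIdx?, List.set]
  by_cases h12 : s = "c12"
  · subst h12; simp [PySem.List.pySetD, PySem.List.pySet?, PySem.List.pyIdx?, List.set]
  by_cases h13 : s = "c13"
  · subst h13; simp [PySem.List.pySetD, PySem.List.pySet?, PySem.List.pyIdx?, List.set]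
  have e : ∀ t : String, s ≠ t → (t == s) = false := by intro t ht; simp [Ne.symm ht]
  simp [e _ h0, e _ h1, e _ h2, e _ h3, e _ h4, e _ h5, e _ h6, e _ h7, e _ h8, e _ h9, e _ h10, e _ h11, e _ h12, e _ h13, PySem.Dict.get?]

-- invariant of A's inner loop: the vector stays an indicator over the fixed category list
lemma pvFoldA (sub : List String) : ∀ (seen : String → Bool),
    sub.foldl pvStepA (pvCats.map fun c => if seen c then (1:Int) else 0)
      = pvCats.map fun c => if (seen c || sub.contains c) then (1:Int) else 0 := by
  induction sub with
  | nil => intro seen; simp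
  | cons s t ih =>
    intro seen
    simp only [List.foldl_cons, pvStepA_map seen s, ih (fun c => seen c || (c == s))]
    simp [Bool.or_assoc]

-- A's row equals B's row for every sublist
lemma pvRow (sub : List String) :
    sub.foldl pvStepA (List.replicate pvCats.length (0 : Int))
      = pvCats.map (fun c => if (PySem.Set.ofList sub).contains c then (1 : Int) else 0) := by
  have h0 : List.replicate pvCats.length (0 : Int)
      = pvCats.map fun c => if (fun _ : String => false) c then (1:Int) else 0 := rfl
  rw [h0, pvFoldA sub (fun _ => false)]
  refine List.map_congr_left (fun c _ => ?_)
  simp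

-- ===== VERDICT (by name: the statement is the Claim_ definition above) =====
theorem activations_to_binary_spec : Claim_equal_activations_to_binary := by
  intro activations _
  unfold Spec_activations_to_binary activations_to_binary activations_to_binary_alt
  rw [PySem.List.foldl_append_singleton_eq_map, PySem.List.foldl_append_singleton_eq_map]
  exact List.map_congr_left (fun sub _ => pvRow sub)
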